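-- pv_equiv track=rewrite | github.com/Skovorp/feral | feral/preprocess_datset.py | get_frame_ids
-- ===== SOURCE A (Python) =====
-- def get_frame_ids(total_frames, chunk_shift, chunk_length):
--         vid_frames = []
--         start_ind = 0
--
--         while True:
--             inds = list(range(start_ind, min(start_ind + chunk_length, total_frames)))
--             if len(inds) != chunk_length:
--                 break
--             vid_frames.append(inds)
--             start_ind = inds[0] + chunk_shift
--         return vid_frames
-- ===== SOURCE B (Python) =====
-- def get_frame_ids(total_frames, chunk_shift, chunk_length):
--     # build the chunk list back-to-front: find the LAST valid start by floor
--     # division, walk starts downward prepending (via append + reverse)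
--     if chunk_length <= 0 or total_frames < chunk_length:
--         return []
--     out = []
--     s = ((total_frames - chunk_length) // chunk_shift) * chunk_shift
--     while s >= 0:
--         out.append(list(range(s, s + chunk_length)))
--         s -= chunk_shift
--     out.reverse()
--     return out
-- ===== Notes on version B (the rewrite author's own statement) =====
-- stated objective: alternative
-- what changed: Instead of A's forward while-True loop that builds each candidate chunk and breaks on a short one, B computes the last valid start in closed form by floor division and builds the output back-to-front, walking the starts downward and reversing at the end.
import Mathlib
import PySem

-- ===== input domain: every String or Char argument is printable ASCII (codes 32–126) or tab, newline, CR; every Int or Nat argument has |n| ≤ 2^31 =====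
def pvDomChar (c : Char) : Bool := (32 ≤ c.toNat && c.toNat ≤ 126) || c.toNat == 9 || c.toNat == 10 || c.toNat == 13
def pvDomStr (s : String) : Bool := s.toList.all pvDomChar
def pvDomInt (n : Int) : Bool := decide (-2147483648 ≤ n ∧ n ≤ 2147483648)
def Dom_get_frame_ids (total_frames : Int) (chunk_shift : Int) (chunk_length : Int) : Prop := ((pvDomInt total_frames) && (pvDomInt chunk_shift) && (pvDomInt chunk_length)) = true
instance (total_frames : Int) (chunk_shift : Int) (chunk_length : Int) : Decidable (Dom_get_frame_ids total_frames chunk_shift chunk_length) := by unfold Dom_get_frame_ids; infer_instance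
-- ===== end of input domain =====

-- B finds the last valid start by floor division and builds the chunk list
-- back-to-front, reversing at the end (objective: alternative; same asymptotic cost).

-- ===== PORT A =====
-- termination fact for the loop body, cited by decreasing_by below
theorem pvLoopA_step (total L start x : Int)
    (hlen : ((PySem.List.pyRange start (min (start + L) total) 1).length : Int) = L)
    (hget : PySem.List.pyGet? (PySem.List.pyRange start (min (start + L) total) 1) 0 = some x) :
    x = start ∧ 0 < L ∧ start + L ≤ total := by
  rw [PySem.List.length_pyRange_one] at hlen
  by_cases hlt : start < min (start + L) total
  · rw [PySem.List.pyRange_one_cons hlt] at hget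
    simp [PySem.List.pyGet?, PySem.List.pyIdx?] at hget
    refine ⟨hget.symm, ?_, ?_⟩ <;> omega
  · rw [PySem.List.pyRange_one_eq_nil (by omega)] at hget
    simp [PySem.List.pyGet?, PySem.List.pyIdx?] at hget

-- the while-True loop of A; the 'none' / non-positive-shift branches are totality guards
-- for inputs where Python raises IndexError / diverges (both excluded by Pre_).
def pvLoopA (total shift L start : Int) : List (List Int) :=
  let inds := PySem.List.pyRange start (min (start + L) total) 1
  if h1 : (inds.length : Int) ≠ L then []
  else
    match h2 : PySem.List.pyGet? inds 0 with
    | none => []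
    | some x =>
      if h3 : 0 < shift then inds :: pvLoopA total shift L (x + shift)
      else []
termination_by (total - start).toNat
decreasing_by
  have hlen : ((PySem.List.pyRange start (min (start + L) total) 1).length : Int) = L := by
    by_contra hc; exact h1 hc
  have := pvLoopA_step total L start x hlen h2
  omega

def get_frame_ids (total_frames : Int) (chunk_shift : Int) (chunk_length : Int) : List (List Int) :=
  pvLoopA total_frames chunk_shift chunk_length 0

-- ===== PORT B =====
-- B's downward while-loop over the starts, appending each chunk; the 0 < shift
-- test is a totality guard for inputs where the Python loop diverges (excluded by Pre_).
def pvLoopB (shift L s : Int) : List (List Int) :=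
  if h : 0 ≤ s ∧ 0 < shift then
    PySem.List.pyRange s (s + L) 1 :: pvLoopB shift L (s - shift)
  else []
termination_by (s + 1).toNat
decreasing_by omega

def get_frame_ids_alt (total_frames : Int) (chunk_shift : Int) (chunk_length : Int) : List (List Int) :=
  if chunk_length ≤ 0 ∨ total_frames < chunk_length then []
  else (pvLoopB chunk_shift chunk_length
          (PySem.Int.floordiv (total_frames - chunk_length) chunk_shift * chunk_shift)).reverse

-- ===== PRECONDITION & SPEC =====
-- Pre_ excludes only inputs where Python A does not return: chunk_length = 0 raises
-- IndexError, and 0 < chunk_length ≤ total_frames with chunk_shift ≤ 0 loops forever.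
def Pre_get_frame_ids (total_frames : Int) (chunk_shift : Int) (chunk_length : Int) : Prop :=
  chunk_length < 0 ∨ (0 < chunk_length ∧ (total_frames < chunk_length ∨ 0 < chunk_shift))
instance (total_frames : Int) (chunk_shift : Int) (chunk_length : Int) : Decidable (Pre_get_frame_ids total_frames chunk_shift chunk_length) := by unfold Pre_get_frame_ids; infer_instance

def pvWitness_get_frame_ids : Int × Int × Int := (4, 2, 3)

def Spec_get_frame_ids (total_frames : Int) (chunk_shift : Int) (chunk_length : Int) (out : List (List Int)) : Prop := out = get_frame_ids_alt total_frames chunk_shift chunk_length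
instance (total_frames : Int) (chunk_shift : Int) (chunk_length : Int) (out : List (List Int)) : Decidable (Spec_get_frame_ids total_frames chunk_shift chunk_length out) := by unfold Spec_get_frame_ids; infer_instance

-- ===== CLAIM (what is proved, stated in full; the proofs are below) =====
def Claim_equal_get_frame_ids : Prop := ∀ (total_frames : Int) (chunk_shift : Int) (chunk_length : Int), Dom_get_frame_ids total_frames chunk_shift chunk_length → Pre_get_frame_ids total_frames chunk_shift chunk_length → Spec_get_frame_ids total_frames chunk_shift chunk_length (get_frame_ids total_frames chunk_shift chunk_length)

-- ===== LEMMAS AND PROOFS =====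

-- range with positive step is empty when start has passed stop
theorem pyRange_pos_nil (a b s : Int) (hs : 0 < s) (hab : b ≤ a) :
    PySem.List.pyRange a b s = [] := by
  rw [PySem.List.pyRange_of_pos a b hs, if_neg (by omega)]
  simp

-- range with positive step peels its first element
theorem pyRange_pos_cons (a b s : Int) (hs : 0 < s) (hab : a < b) :
    PySem.List.pyRange a b s = a :: PySem.List.pyRange (a + s) b s := by
  rw [PySem.List.pyRange_of_pos a b hs, PySem.List.pyRange_of_pos (a + s) b hs]
  by_cases h : a + s < b
  · have hn : ((b - a + s - 1) / s).toNat = ((b - (a + s) + s - 1) / s).toNat + 1 := by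
      have e1 : b - a + s - 1 = (b - (a + s) + s - 1) + 1 * s := by ring
      rw [e1, Int.add_mul_ediv_right _ _ (by omega : s ≠ 0)]
      have h2 : 0 ≤ (b - (a + s) + s - 1) / s := Int.ediv_nonneg (by omega) (by omega)
      omega
    simp only [if_pos hab, if_pos h, hn, List.range_succ_eq_map, List.map_cons, List.map_map,
      Nat.cast_zero, mul_zero, add_zero]
    congr 1
    apply List.map_congr_left
    intro k _
    simp only [Function.comp, Nat.cast_succ]
    ring
  · have hn : ((b - a + s - 1) / s).toNat = 1 := by
      have e1 : b - a + s - 1 = (b - a - 1) + 1 * s := by ring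
      have e2 : (b - a - 1) / s = 0 := Int.ediv_eq_zero_of_lt (by omega) (by omega)
      have : (b - a + s - 1) / s = 1 := by
        rw [e1, Int.add_mul_ediv_right _ _ (by omega : s ≠ 0), e2]
        omega
      omega
    simp only [if_pos hab, if_neg h, hn]
    simp

-- A's loop equals the chunk list over the increasing starts, given 0 < L and 0 < shift
theorem pvLoopA_eq (total shift L : Int) (hL : 0 < L) (hs : 0 < shift) :
    ∀ start, pvLoopA total shift L start =
      (PySem.List.pyRange start (total - L + 1) shift).map
        (fun s => PySem.List.pyRange s (s + L) 1) := by
  intro start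
  induction hwf : (total - start).toNat using Nat.strong_induction_on generalizing start with
  | _ n ih =>
    rw [pvLoopA]
    by_cases hfit : start + L ≤ total
    · have hmin : min (start + L) total = start + L := by omega
      have hlen : (((PySem.List.pyRange start (min (start + L) total) 1).length : Int)) = L := by
        rw [hmin, PySem.List.length_pyRange_one]; omega
      rw [dif_neg (by omega)]
      have hcons : PySem.List.pyRange start (min (start + L) total) 1
          = start :: PySem.List.pyRange (start + 1) (min (start + L) total) 1 := by
        exact PySem.List.pyRange_one_cons (by omega)
      split
      · rename_i heq
        rw [hcons] at heq
        simp [PySem.List.pyGet?, PySem.List.pyIdx?] at heq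
      · rename_i x heq
        have hx : x = start := by
          rw [hcons] at heq
          simp [PySem.List.pyGet?, PySem.List.pyIdx?] at heq
          omega
        rw [dif_pos hs, hx]
        rw [pyRange_pos_cons start (total - L + 1) shift hs (by omega)]
        rw [List.map_cons]
        have := ih (total - (start + shift)).toNat (by omega) (start + shift) rfl
        rw [this, hmin]
    · have hne : (((PySem.List.pyRange start (min (start + L) total) 1).length : Int)) ≠ L := by
        rw [PySem.List.length_pyRange_one]; omega
      rw [dif_pos hne]
      rw [pyRange_pos_nil start (total - L + 1) shift hs (by omega)]
      simp

-- B's downward loop from the m-th start yields the first m+1 chunks reversed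
theorem pvLoopB_eq (shift L : Int) (hs : 0 < shift) :
    ∀ m : Nat, pvLoopB shift L ((m : Int) * shift) =
      ((List.range (m + 1)).map
        (fun i : Nat => PySem.List.pyRange ((i : Int) * shift) ((i : Int) * shift + L) 1)).reverse := by
  intro m
  induction m with
  | zero =>
    rw [pvLoopB, dif_pos ⟨by omega, hs⟩, pvLoopB, dif_neg (by omega)]
    simp
  | succ k ih =>
    rw [pvLoopB, dif_pos ⟨by positivity, hs⟩]
    have : (((k + 1 : Nat) : Int)) * shift - shift = (k : Int) * shift := by push_cast; ring
    rw [this, ih]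
    simp only [List.range_succ, List.map_append, List.reverse_append, List.map_cons,
      List.map_nil, List.reverse_cons, List.reverse_nil, List.nil_append, List.cons_append]

-- ===== VERDICT (by name: the statement is the Claim_ definition above) =====
theorem get_frame_ids_spec : Claim_equal_get_frame_ids := by
  intro total shift L _hdom hpre
  unfold Spec_get_frame_ids get_frame_ids get_frame_ids_alt
  rcases hpre with hneg | ⟨hpos, hcase⟩
  · -- chunk_length < 0: the first chunk is shorter than L, A breaks at once
    rw [pvLoopA]
    have : (((PySem.List.pyRange 0 (min (0 + L) total) 1).length : Int)) ≠ L := by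
      rw [PySem.List.length_pyRange_one]; omega
    rw [dif_pos this, if_pos (by omega : L ≤ 0 ∨ total < L)]
  · by_cases htot : total < L
    · -- no full chunk fits: A breaks at once
      rw [pvLoopA]
      have : (((PySem.List.pyRange 0 (min (0 + L) total) 1).length : Int)) ≠ L := by
        rw [PySem.List.length_pyRange_one]; omega
      rw [dif_pos this, if_pos (by omega : L ≤ 0 ∨ total < L)]
    · have hs : 0 < shift := by omega
      rw [pvLoopA_eq total shift L hpos hs 0, if_neg (by omega)]
      -- both sides are the chunk list over starts 0, shift, …, m*shift
      have hfd : PySem.Int.floordiv (total - L) shift = (total - L) / shift :=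
        PySem.Int.floordiv_eq_ediv_of_pos (by omega)
      have hm0 : 0 ≤ (total - L) / shift := Int.ediv_nonneg (by omega) (by omega)
      set k : Nat := ((total - L) / shift).toNat with hk
      have hcast : PySem.Int.floordiv (total - L) shift * shift = (k : Int) * shift := by
        rw [hfd]; congr 1; omega
      rw [hcast, pvLoopB_eq shift L hs k, List.reverse_reverse]
      -- identify the start list
      rw [PySem.List.pyRange_of_pos 0 (total - L + 1) hs, if_pos (by omega)]
      have hn : ((total - L + 1 - 0 + shift - 1) / shift).toNat = k + 1 := by
        have e1 : total - L + 1 - 0 + shift - 1 = (total - L) + 1 * shift := by ring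
        rw [e1, Int.add_mul_ediv_right _ _ (by omega : shift ≠ 0)]
        omega
      rw [hn, List.map_map]
      apply List.map_congr_left
      intro i _
      simp only [Function.comp]
      ring_nf
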